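-- pv_equiv track=rewrite | github.com/JubilantJerry/CNN-Glasses-Remover | data_organizer.py | split3_breaks
-- ===== SOURCE A (Python) =====
-- def split3_breaks(arr, last_train, last_veri):
-- 	[arr1, arr2, arr3] = [[], [], []]
-- 	for i in range(len(arr)):
-- 		face = arr[i][0]
-- 		if (face <= last_train):
-- 			arr1.append(arr[i])
-- 		elif (face <= last_veri):
-- 			arr2.append(arr[i])
-- 		else:
-- 			arr3.append(arr[i])
-- 	return [arr1, arr2, arr3]
-- ===== SOURCE B (Python) =====
-- def split3_breaks(arr, last_train, last_veri):
--     arr1 = [x for x in arr if x[0] <= last_train]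
--     arr2 = [x for x in arr if last_train < x[0] <= last_veri]
--     arr3 = [x for x in arr if last_train < x[0] and last_veri < x[0]]
--     return [arr1, arr2, arr3]
-- ===== Notes on version B (the rewrite author's own statement) =====
-- stated objective: simpler
-- what changed: Replaces the single index loop with three mutable accumulators by three independent filter passes (list comprehensions), one per bucket.
import Mathlib
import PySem

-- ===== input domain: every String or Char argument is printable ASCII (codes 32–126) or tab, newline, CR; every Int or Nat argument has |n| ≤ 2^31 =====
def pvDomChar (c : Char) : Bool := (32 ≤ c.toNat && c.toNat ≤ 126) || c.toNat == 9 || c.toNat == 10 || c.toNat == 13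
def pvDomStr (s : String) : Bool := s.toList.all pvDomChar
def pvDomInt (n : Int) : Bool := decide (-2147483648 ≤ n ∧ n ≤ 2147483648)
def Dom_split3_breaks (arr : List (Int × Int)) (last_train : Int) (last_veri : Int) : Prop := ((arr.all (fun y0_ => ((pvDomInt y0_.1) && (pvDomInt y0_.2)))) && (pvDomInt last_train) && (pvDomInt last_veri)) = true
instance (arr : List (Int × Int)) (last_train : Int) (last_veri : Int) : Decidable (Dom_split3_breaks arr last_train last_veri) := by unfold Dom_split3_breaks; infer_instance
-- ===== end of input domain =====

-- ===== PORT A =====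
-- B changes A's single loop with three mutable accumulators into three independent filter passes (objective: simpler).
-- Loop over the elements of arr (A iterates range(len(arr)) reading arr[i]), threading the three buckets.
def split3_breaks (arr : List (Int × Int)) (last_train : Int) (last_veri : Int) : List (List (Int × Int)) :=
  let s := arr.foldl (fun (acc : List (Int × Int) × List (Int × Int) × List (Int × Int)) x =>
    let face := x.1
    if face ≤ last_train then (acc.1 ++ [x], acc.2.1, acc.2.2)
    else if face ≤ last_veri then (acc.1, acc.2.1 ++ [x], acc.2.2)
    else (acc.1, acc.2.1, acc.2.2 ++ [x])) ([], [], [])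
  [s.1, s.2.1, s.2.2]

-- ===== PORT B =====
def split3_breaks_alt (arr : List (Int × Int)) (last_train : Int) (last_veri : Int) : List (List (Int × Int)) :=
  [arr.filter (fun x => x.1 ≤ last_train),
   arr.filter (fun x => last_train < x.1 && x.1 ≤ last_veri),
   arr.filter (fun x => last_train < x.1 && last_veri < x.1)]

-- ===== PRECONDITION & SPEC =====
def Spec_split3_breaks (arr : List (Int × Int)) (last_train : Int) (last_veri : Int) (out : List (List (Int × Int))) : Prop := out = split3_breaks_alt arr last_train last_veri
instance (arr : List (Int × Int)) (last_train : Int) (last_veri : Int) (out : List (List (Int × Int))) : Decidable (Spec_split3_breaks arr last_train last_veri out) := by unfold Spec_split3_breaks; infer_instance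

-- ===== CLAIM =====
def Claim_equal_split3_breaks : Prop := ∀ (arr : List (Int × Int)) (last_train : Int) (last_veri : Int), Dom_split3_breaks arr last_train last_veri → Spec_split3_breaks arr last_train last_veri (split3_breaks arr last_train last_veri)

-- ===== LEMMAS AND PROOFS =====
theorem split3_foldl_eq (last_train last_veri : Int) (arr a1 a2 a3 : List (Int × Int)) :
    arr.foldl (fun (acc : List (Int × Int) × List (Int × Int) × List (Int × Int)) x =>
      let face := x.1
      if face ≤ last_train then (acc.1 ++ [x], acc.2.1, acc.2.2)
      else if face ≤ last_veri then (acc.1, acc.2.1 ++ [x], acc.2.2)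
      else (acc.1, acc.2.1, acc.2.2 ++ [x])) (a1, a2, a3)
    = (a1 ++ arr.filter (fun x => x.1 ≤ last_train),
       a2 ++ arr.filter (fun x => last_train < x.1 && x.1 ≤ last_veri),
       a3 ++ arr.filter (fun x => last_train < x.1 && last_veri < x.1)) := by
  induction arr generalizing a1 a2 a3 with
  | nil => simp
  | cons x t ih =>
    simp only [List.foldl_cons, List.filter_cons]
    by_cases h1 : x.1 ≤ last_train
    · simp [h1, not_lt.mpr h1, ih]
    · by_cases h2 : x.1 ≤ last_veri
      · simp [h1, h2, lt_of_not_ge h1, not_lt.mpr h2, ih]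
      · simp [h1, h2, lt_of_not_ge h1, lt_of_not_ge h2, ih]

-- ===== VERDICT =====
theorem split3_breaks_spec : Claim_equal_split3_breaks := by
  intro arr lt lv _
  unfold Spec_split3_breaks split3_breaks split3_breaks_alt
  simp [split3_foldl_eq]
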